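-- pv_equiv track=rewrite | github.com/ctwoodwa/the-inverted-stack | build/librivox_browse.py | _is_solo
-- ===== SOURCE A (Python) =====
-- from typing import Any
--
-- def _is_solo(book: dict[str, Any]) -> bool:
--     """A book is solo iff every section has exactly one reader and they all match."""
--     seen: set[str] = set()
--     for sec in book.get("sections", []) or []:
--         readers = sec.get("readers") or []
--         if len(readers) != 1:
--             return False
--         seen.add(readers[0].get("reader_id", ""))
--     return len(seen) == 1
-- ===== SOURCE B (Python) =====
-- def _is_solo(book):
--     sections = book.get("sections", []) or []
--     if not sections:
--         return False
--     first_readers = sections[0].get("readers") or []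
--     if len(first_readers) != 1:
--         return False
--     ref_id = first_readers[0].get("reader_id", "")
--     return all(
--         len(rs) == 1 and rs[0].get("reader_id", "") == ref_id
--         for rs in (sec.get("readers") or [] for sec in sections)
--     )
-- ===== Notes on version B (the rewrite author's own statement) =====
-- stated objective: simpler
-- what changed: B drops the accumulated set entirely: it fixes the first section's reader_id as the reference and returns all(len==1 and id==ref) over the sections, instead of building a set of ids and counting its distinct elements at the end.
import Mathlib
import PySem

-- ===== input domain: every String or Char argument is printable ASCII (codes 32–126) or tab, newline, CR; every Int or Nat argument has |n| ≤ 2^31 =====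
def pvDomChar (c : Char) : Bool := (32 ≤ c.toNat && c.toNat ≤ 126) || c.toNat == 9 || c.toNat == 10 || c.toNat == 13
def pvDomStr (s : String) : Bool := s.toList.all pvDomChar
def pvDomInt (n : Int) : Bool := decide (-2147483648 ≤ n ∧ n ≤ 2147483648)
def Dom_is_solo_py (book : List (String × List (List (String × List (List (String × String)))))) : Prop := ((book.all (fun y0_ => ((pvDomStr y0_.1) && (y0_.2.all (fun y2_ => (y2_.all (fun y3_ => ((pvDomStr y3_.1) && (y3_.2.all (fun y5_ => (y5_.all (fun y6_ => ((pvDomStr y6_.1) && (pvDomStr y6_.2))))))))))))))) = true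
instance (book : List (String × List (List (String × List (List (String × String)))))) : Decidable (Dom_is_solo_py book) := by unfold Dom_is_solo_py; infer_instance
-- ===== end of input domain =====

-- B replaces A's set-of-reader-ids accumulation by a single reference id taken from the
-- first section and an all(...) equality check; objective: simpler.
-- ===== PORT A =====
-- dict.get k default over an association list (first match), used by both ports
def pvDictGetD {a : Type} (d : List (String × a)) (k : String) (dflt : a) : a :=
  match d.find? (fun p => p.1 == k) with
  | some p => p.2
  | none => dflt

-- the for-loop of A: early return False, else add the reader_id to `seen`; at the end len(seen)==1
def isSoloLoop (secs : List (List (String × List (List (String × String))))) (seen : PySem.Set String) : Bool :=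
  match secs with
  | [] => decide (PySem.Set.len seen = 1)
  | sec :: rest =>
    let readers := pvDictGetD sec "readers" []
    if readers.length ≠ 1 then false
    else isSoloLoop rest (PySem.Set.add seen (pvDictGetD (readers.headD []) "reader_id" ""))

def is_solo_py (book : List (String × List (List (String × List (List (String × String)))))) : Bool :=
  isSoloLoop (pvDictGetD book "sections" []) PySem.Set.empty

-- ===== PORT B =====
def is_solo_py_alt (book : List (String × List (List (String × List (List (String × String)))))) : Bool :=
  match pvDictGetD book "sections" [] with
  | [] => false
  | first :: rest =>
    let firstReaders := pvDictGetD first "readers" []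
    if firstReaders.length ≠ 1 then false
    else
      let refId := pvDictGetD (firstReaders.headD []) "reader_id" ""
      (first :: rest).all (fun sec =>
        let rs := pvDictGetD sec "readers" []
        rs.length == 1 && (pvDictGetD (rs.headD []) "reader_id" "" == refId))

-- ===== PRECONDITION & SPEC =====
def Spec_is_solo_py (book : List (String × List (List (String × List (List (String × String)))))) (out : Bool) : Prop := out = is_solo_py_alt book
instance (book : List (String × List (List (String × List (List (String × String)))))) (out : Bool) : Decidable (Spec_is_solo_py book out) := by unfold Spec_is_solo_py; infer_instance

-- ===== CLAIM (what is proved, stated in full; the proofs are below) =====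
def Claim_equal_is_solo_py : Prop := ∀ (book : List (String × List (List (String × List (List (String × String)))))), Dom_is_solo_py book → Spec_is_solo_py book (is_solo_py book)

-- ===== LEMMAS AND PROOFS =====

-- ===== VERDICT (by name: the statement is the Claim_ definition above) =====
-- a set of size ≥ 2 never shrinks, so the final len==1 test fails (or an early False fires)
lemma isSoloLoop_big (secs : List (List (String × List (List (String × String))))) :
    ∀ seen : PySem.Set String, 2 ≤ PySem.Set.len seen → isSoloLoop secs seen = false := by
  induction secs with
  | nil =>
    intro seen h
    simp only [isSoloLoop, decide_eq_false_iff_not]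
    omega
  | cons sec rest ih =>
    intro seen h
    simp only [isSoloLoop]
    split
    · rfl
    · apply ih
      have hle : PySem.Set.len seen ≤ PySem.Set.len
          (PySem.Set.add seen (pvDictGetD ((pvDictGetD sec "readers" []).headD []) "reader_id" "")) := by
        simp only [PySem.Set.add, PySem.Set.len]
        split <;> simp
      omega

-- with `seen = {r}`, A's loop is exactly B's all(...) check against the reference r
lemma isSoloLoop_single (secs : List (List (String × List (List (String × String))))) (r : String) :
    isSoloLoop secs [r] =
      secs.all (fun sec =>
        let rs := pvDictGetD sec "readers" []
        rs.length == 1 && (pvDictGetD (rs.headD []) "reader_id" "" == r)) := by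
  induction secs with
  | nil => rfl
  | cons sec rest ih =>
    simp only [isSoloLoop, List.all_cons]
    by_cases hlen : (pvDictGetD sec "readers" []).length = 1
    · obtain ⟨x, hx⟩ := List.length_eq_one_iff.mp hlen
      rw [hx]
      simp only [List.headD_cons, List.length_cons, List.length_nil]
      rw [if_neg (by omega)]
      by_cases hid : pvDictGetD x "reader_id" "" = r
      · rw [hid]
        have hadd : PySem.Set.add [r] r = [r] := by simp [PySem.Set.add]
        rw [hadd, ih]
        simp
      · have hadd : PySem.Set.add [r] (pvDictGetD x "reader_id" "") = [r, pvDictGetD x "reader_id" ""] := by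
          simp [PySem.Set.add, PySem.Set.contains, hid]
        rw [hadd, isSoloLoop_big _ _ (by simp [PySem.Set.len])]
        simp [hid]
    · rw [if_pos hlen]
      simp [hlen]

theorem is_solo_py_spec : Claim_equal_is_solo_py := by
  intro book _
  unfold Spec_is_solo_py is_solo_py is_solo_py_alt
  cases hsecs : pvDictGetD book "sections" [] with
  | nil => rfl
  | cons first rest =>
    simp only [isSoloLoop]
    by_cases hlen : (pvDictGetD first "readers" []).length = 1
    · obtain ⟨x, hx⟩ := List.length_eq_one_iff.mp hlen
      rw [hx]
      simp only [List.headD_cons, List.length_cons, List.length_nil]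
      rw [if_neg (by omega), if_neg (by omega)]
      have hempty : PySem.Set.add PySem.Set.empty (pvDictGetD x "reader_id" "") = [pvDictGetD x "reader_id" ""] := rfl
      rw [hempty, isSoloLoop_single]
      simp [hx]
    · rw [if_pos hlen, if_pos hlen]
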